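-- pv_equiv track=rewrite | github.com/Deniskoltovich/BSUIR-stuff | 4-semester/AOIS_/lab1.py | from_direct_to_additional
-- ===== SOURCE A (Python) =====
-- def from_direct_to_additional(number: list) -> list:
--     if number[0] == 0:
--         return number
--     reversed = reverse_binary_code(number)
--     for i in range(len(reversed) - 1, -1, -1):
--         if reversed[i] == 0:
--             reversed[i] = 1
--             break
--         else:
--             reversed[i] = 0
--     return reversed
--
-- def reverse_binary_code(number: list) -> list:
--     if number[0] == 0:
--         return number
--     return number[:1] + [int(not digit) for digit in number[1:]]
-- ===== SOURCE B (Python) =====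
-- def from_direct_to_additional(number: list) -> list:
--     if number[0] == 0:
--         return number
--     out = []
--     seen = False
--     for d in reversed(number[1:]):
--         if seen:
--             out.append(0 if d else 1)
--         elif d:
--             out.append(1)
--             seen = True
--         else:
--             out.append(0)
--     out.append(number[0] if seen else 0)
--     out.reverse()
--     return out
-- ===== Notes on version B (the rewrite author's own statement) =====
-- stated objective: alternative
-- what changed: Single right-to-left pass with a seen-one flag replaces A's invert-all-then-add-one two-phase construction (no intermediate one's-complement list, no mutation loop).
-- outside the precondition, e.g. on from_direct_to_additional([]): A raises IndexError, B raises IndexError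
import Mathlib
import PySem

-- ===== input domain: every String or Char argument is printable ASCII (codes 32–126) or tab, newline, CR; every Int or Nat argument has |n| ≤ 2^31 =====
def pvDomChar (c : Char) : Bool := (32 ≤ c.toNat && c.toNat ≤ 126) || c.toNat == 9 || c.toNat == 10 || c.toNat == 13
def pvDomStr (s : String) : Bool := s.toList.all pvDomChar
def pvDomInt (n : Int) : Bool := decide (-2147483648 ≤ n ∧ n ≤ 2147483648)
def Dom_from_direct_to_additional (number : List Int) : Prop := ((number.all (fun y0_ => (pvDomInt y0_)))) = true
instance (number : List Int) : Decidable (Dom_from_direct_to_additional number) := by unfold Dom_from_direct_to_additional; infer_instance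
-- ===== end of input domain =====

-- B replaces A's invert-then-add-one two-phase construction with a single right-to-left
-- pass using a seen-one flag (alternative decomposition, same O(n) cost).


-- ===== PORT A =====
-- helper: `int(not digit)` for a Python int digit
def pvNotInt (d : Int) : Int := if d = 0 then 1 else 0

-- the +1 loop of A: `for i in range(len(l)-1,-1,-1): if l[i]==0: l[i]=1; break else: l[i]=0`,
-- transcribed as structural recursion (the recursive call processes the suffix, i.e. the
-- indices the loop visits first); the Bool is "the loop is still running when it reaches
-- this position" (no break yet).
def pvAddOne : List Int → List Int × Bool
  | [] => ([], true)
  | x :: xs =>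
      let r := pvAddOne xs
      if r.2 then
        if x = 0 then (1 :: r.1, false) else (0 :: r.1, true)
      else (x :: r.1, false)

def reverse_binary_code (number : List Int) : List Int :=
  match number with
  | [] => []            -- number[0] raises IndexError; excluded by Pre_
  | h :: t => if h = 0 then number else h :: t.map pvNotInt   -- number[:1] + [int(not d) for d in number[1:]]

def from_direct_to_additional (number : List Int) : List Int :=
  match number with
  | [] => []            -- number[0] raises IndexError; excluded by Pre_
  | h :: _ =>
      if h = 0 then number
      else (pvAddOne (reverse_binary_code number)).1

-- ===== PORT B =====
-- Source B's loop over reversed(number[1:]) with accumulator (out, seen); out is appended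
-- at the end and reversed at the very end, exactly as in Source B.
def pvStep (acc : List Int × Bool) (d : Int) : List Int × Bool :=
  if acc.2 then (acc.1 ++ [if d = 0 then 1 else 0], true)
  else if d ≠ 0 then (acc.1 ++ [1], true)
  else (acc.1 ++ [0], false)

def from_direct_to_additional_alt (number : List Int) : List Int :=
  match number with
  | [] => []            -- number[0] raises IndexError; excluded by Pre_
  | h :: rest =>
      if h = 0 then number
      else
        let p := rest.reverse.foldl pvStep ([], false)
        (p.1 ++ [if p.2 then h else 0]).reverse

-- ===== PRECONDITION & SPEC =====
-- Pre_ excludes only the empty list, on which A (number[0]) raises IndexError.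
def Pre_from_direct_to_additional (number : List Int) : Prop := number ≠ []
instance (number : List Int) : Decidable (Pre_from_direct_to_additional number) := by unfold Pre_from_direct_to_additional; infer_instance
def pvWitness_from_direct_to_additional : List Int := [1, 0, 1]

def Spec_from_direct_to_additional (number : List Int) (out : List Int) : Prop := out = from_direct_to_additional_alt number
instance (number : List Int) (out : List Int) : Decidable (Spec_from_direct_to_additional number out) := by unfold Spec_from_direct_to_additional; infer_instance

-- ===== CLAIM (what is proved, stated in full; the proofs are below) =====
def Claim_equal_from_direct_to_additional : Prop := ∀ (number : List Int), Dom_from_direct_to_additional number → Pre_from_direct_to_additional number → Spec_from_direct_to_additional number (from_direct_to_additional number)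

-- ===== LEMMAS AND PROOFS =====

-- snoc characterisation of A's +1 loop
theorem pvAddOne_snoc (m : List Int) (y : Int) :
    pvAddOne (m ++ [y]) =
      if y = 0 then (m ++ [1], false)
      else ((pvAddOne m).1 ++ [0], (pvAddOne m).2) := by
  induction m with
  | nil => by_cases hy : y = 0 <;> simp [pvAddOne, hy]
  | cons x xs ih =>
      by_cases hy : y = 0
      · subst hy
        simp only [reduceIte] at ih ⊢
        simp [pvAddOne, ih]
      · rw [if_neg hy]
        rw [if_neg hy] at ih
        simp only [List.cons_append, pvAddOne, ih]
        by_cases hc : (pvAddOne xs).2 <;> by_cases hx : x = 0 <;> simp [hc, hx]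

theorem pvStep_false (o : List Int) (d : Int) :
    pvStep (o, false) d = if d = 0 then (o ++ [0], false) else (o ++ [1], true) := by
  by_cases hd : d = 0 <;> simp [pvStep, hd]

-- shifting the accumulator out of B's fold, seen = true branch
theorem pvFold_true (r : List Int) (out0 : List Int) :
    r.foldl pvStep (out0, true) = (out0 ++ r.map pvNotInt, true) := by
  induction r generalizing out0 with
  | nil => simp
  | cons d r ih => simp [pvStep, pvNotInt, ih]

-- shifting the accumulator out of B's fold, seen = false branch
theorem pvFold_false (r : List Int) (out0 : List Int) :
    r.foldl pvStep (out0, false) =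
      (out0 ++ (r.foldl pvStep ([], false)).1, (r.foldl pvStep ([], false)).2) := by
  induction r generalizing out0 with
  | nil => simp
  | cons d r ih =>
      by_cases hd : d = 0
      · simp only [List.foldl_cons, pvStep_false, if_pos hd, List.nil_append]
        rw [ih (out0 ++ [0]), ih [(0 : Int)]]
        simp
      · simp only [List.foldl_cons, pvStep_false, if_neg hd, List.nil_append]
        rw [pvFold_true r (out0 ++ [1]), pvFold_true r [(1 : Int)]]
        simp

-- the bridge: B's fold over the reversed tail computes A's +1 loop on the inverted tail
theorem pvBridge (r : List Int) :
    pvAddOne (r.reverse.map pvNotInt) =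
      ((r.foldl pvStep ([], false)).1.reverse, !(r.foldl pvStep ([], false)).2) := by
  induction r with
  | nil => simp [pvAddOne]
  | cons d r ih =>
      have hrev : (d :: r).reverse.map pvNotInt = r.reverse.map pvNotInt ++ [pvNotInt d] := by
        simp
      rw [hrev, pvAddOne_snoc]
      by_cases hd : d = 0
      · rw [if_neg (by simp [pvNotInt, hd]), ih]
        simp only [List.foldl_cons, pvStep_false, if_pos hd, List.nil_append]
        rw [pvFold_false r [(0 : Int)]]
        simp
      · rw [if_pos (by simp [pvNotInt, hd])]
        simp only [List.foldl_cons, pvStep_false, if_neg hd, List.nil_append]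
        rw [pvFold_true r [(1 : Int)]]
        simp [List.map_reverse]

-- ===== VERDICT (by name: the statement is the Claim_ definition above) =====
theorem from_direct_to_additional_spec : Claim_equal_from_direct_to_additional := by
  intro number _ hpre
  unfold Spec_from_direct_to_additional
  match number with
  | [] => exact absurd rfl hpre
  | h :: rest =>
      by_cases hh : h = 0
      · simp [from_direct_to_additional, from_direct_to_additional_alt, hh]
      · have hb := pvBridge rest.reverse
        rw [List.reverse_reverse] at hb
        simp only [from_direct_to_additional, from_direct_to_additional_alt,
          reverse_binary_code, if_neg hh]
        simp only [pvAddOne, hb]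
        by_cases hs : (rest.reverse.foldl pvStep ([], false)).2 <;>
          simp [hs, hh, -List.foldl_reverse]
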